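-- pv_equiv track=rewrite | github.com/yiyabo/GAgent | tool_box/tools_impl/graph_rag/service.py | _prioritise_triples
-- ===== SOURCE A (Python) =====
-- from typing import Any, Dict, Iterable, List, Optional, Sequence
--
-- def _prioritise_triples(
--     triples: List[Dict[str, Any]],
--     focus_entities: Optional[Sequence[str]],
-- ) -> List[Dict[str, Any]]:
--     if not triples:
--         return triples
--     if not focus_entities:
--         return triples
--
--     focus_tokens = {
--         str(entity).strip().lower()
--         for entity in focus_entities
--         if isinstance(entity, str) and entity.strip()
--     }
--     if not focus_tokens:
--         return triples
--
--     def _score(triple: Dict[str, Any]) -> int: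
--         score = 0
--         for key in ("entity1", "entity2"):
--             value = str(triple.get(key) or "").strip().lower()
--             if not value:
--                 continue
--             if value in focus_tokens:
--                 score += 2
--             elif any(token in value for token in focus_tokens):
--                 score += 1
--         return -score  # sort ascending but using negative to prioritise higher score
--
--     return sorted(triples, key=_score)
-- ===== SOURCE B (Python) =====
-- from typing import Any, Dict, List, Optional, Sequence
--
-- def _prioritise_triples(
--     triples: List[Dict[str, Any]],
--     focus_entities: Optional[Sequence[str]],
-- ) -> List[Dict[str, Any]]:
--     if not triples:
--         return triples
--     if not focus_entities:
--         return triples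
--
--     focus_tokens = {
--         str(entity).strip().lower()
--         for entity in focus_entities
--         if isinstance(entity, str) and entity.strip()
--     }
--     if not focus_tokens:
--         return triples
--
--     def _entity_match(raw: Any) -> int:
--         value = str(raw or "").strip().lower()
--         if not value:
--             return 0
--         if value in focus_tokens:
--             return 2
--         if any(token in value for token in focus_tokens):
--             return 1
--         return 0
--
--     # stable counting sort into five score buckets (score is always 0..4)
--     b0: List[Dict[str, Any]] = []
--     b1: List[Dict[str, Any]] = []
--     b2: List[Dict[str, Any]] = []
--     b3: List[Dict[str, Any]] = []
--     b4: List[Dict[str, Any]] = []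
--     for triple in triples:
--         s = _entity_match(triple.get("entity1")) + _entity_match(triple.get("entity2"))
--         if s == 4:
--             b4.append(triple)
--         elif s == 3:
--             b3.append(triple)
--         elif s == 2:
--             b2.append(triple)
--         elif s == 1:
--             b1.append(triple)
--         else:
--             b0.append(triple)
--     return b4 + b3 + b2 + b1 + b0
-- ===== Notes on version B (the rewrite author's own statement) =====
-- stated objective: alternative
-- what changed: Replaces the comparison sort (sorted with a negated-score key) by a stable 5-bucket counting sort: one pass appends each triple to the bucket of its match score (always 0..4), then buckets are concatenated from score 4 down to 0; the score itself is computed as a per-entity helper summed over the two keys instead of a loop with an accumulator.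
import Mathlib
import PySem

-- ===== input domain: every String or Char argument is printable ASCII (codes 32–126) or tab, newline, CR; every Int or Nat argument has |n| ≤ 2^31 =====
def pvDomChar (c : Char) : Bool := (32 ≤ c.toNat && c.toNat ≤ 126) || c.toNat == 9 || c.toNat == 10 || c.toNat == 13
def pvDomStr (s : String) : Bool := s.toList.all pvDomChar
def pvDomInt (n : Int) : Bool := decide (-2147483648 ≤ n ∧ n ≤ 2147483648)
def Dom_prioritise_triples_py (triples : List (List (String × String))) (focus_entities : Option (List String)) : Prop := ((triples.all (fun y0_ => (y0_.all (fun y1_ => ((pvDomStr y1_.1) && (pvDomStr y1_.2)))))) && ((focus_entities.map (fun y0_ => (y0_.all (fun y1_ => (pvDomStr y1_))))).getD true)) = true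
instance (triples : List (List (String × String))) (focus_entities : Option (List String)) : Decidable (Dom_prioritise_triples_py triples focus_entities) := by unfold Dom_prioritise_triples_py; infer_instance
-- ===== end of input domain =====

-- B replaces A's comparison sort by a stable 5-bucket counting sort over the match score (alternative algorithm, same results).

-- ===== PORT A =====
-- str(triple.get(key) or "").strip().lower()  ('or ""' turns a missing key into ""; on a present string it only maps "" to "", i.e. identity)
def pvValueA (triple : List (String × String)) (key : String) : String :=
  PySem.Str.lower (PySem.Str.strip (match PySem.Dict.get? (PySem.Dict.mk triple) key with
    | none => ""
    | some v => if v == "" then "" else v))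

-- the nested _score: a loop over ("entity1", "entity2") accumulating score, returning -score
def pvScoreA (focusTokens : List String) (triple : List (String × String)) : Int :=
  -(["entity1", "entity2"].foldl (fun score key =>
      let value := pvValueA triple key
      if value == "" then score
      else if PySem.Set.contains focusTokens value then score + 2
      else if focusTokens.any (fun token => PySem.Str.isIn token value) then score + 1
      else score) 0)

def prioritise_triples_py (triples : List (List (String × String))) (focus_entities : Option (List String)) : List (List (String × String)) :=
  if triples = [] then triples
  else
    match focus_entities with
    | none => triples
    | some fes =>
      if fes = [] then triples
      else
        let focusTokens : PySem.Set String := PySem.Set.ofList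
          ((fes.filter (fun e => PySem.Str.strip e != "")).map (fun e => PySem.Str.lower (PySem.Str.strip e)))
        if focusTokens = [] then triples
        else PySem.List.sorted triples (pvScoreA focusTokens)

-- ===== PORT B =====
def pvEntityMatch (focusTokens : List String) (raw : Option String) : Int :=
  let value := PySem.Str.lower (PySem.Str.strip (match raw with
    | none => ""
    | some v => if v == "" then "" else v))
  if value == "" then 0
  else if PySem.Set.contains focusTokens value then 2
  else if focusTokens.any (fun token => PySem.Str.isIn token value) then 1
  else 0

def pvMatchScoreB (focusTokens : List String) (triple : List (String × String)) : Int :=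
  pvEntityMatch focusTokens (PySem.Dict.get? (PySem.Dict.mk triple) "entity1")
  + pvEntityMatch focusTokens (PySem.Dict.get? (PySem.Dict.mk triple) "entity2")

-- the bucket pass: acc = (b0, b1, b2, b3, b4)
def pvBucketStep (focusTokens : List String)
    (acc : List (List (String × String)) × List (List (String × String)) × List (List (String × String)) × List (List (String × String)) × List (List (String × String)))
    (triple : List (String × String)) :
    List (List (String × String)) × List (List (String × String)) × List (List (String × String)) × List (List (String × String)) × List (List (String × String)) :=
  let s := pvMatchScoreB focusTokens triple
  if s == 4 then (acc.1, acc.2.1, acc.2.2.1, acc.2.2.2.1, acc.2.2.2.2 ++ [triple])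
  else if s == 3 then (acc.1, acc.2.1, acc.2.2.1, acc.2.2.2.1 ++ [triple], acc.2.2.2.2)
  else if s == 2 then (acc.1, acc.2.1, acc.2.2.1 ++ [triple], acc.2.2.2.1, acc.2.2.2.2)
  else if s == 1 then (acc.1, acc.2.1 ++ [triple], acc.2.2.1, acc.2.2.2.1, acc.2.2.2.2)
  else (acc.1 ++ [triple], acc.2.1, acc.2.2.1, acc.2.2.2.1, acc.2.2.2.2)

def prioritise_triples_py_alt (triples : List (List (String × String))) (focus_entities : Option (List String)) : List (List (String × String)) :=
  if triples = [] then triples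
  else
    match focus_entities with
    | none => triples
    | some fes =>
      if fes = [] then triples
      else
        let focusTokens : PySem.Set String := PySem.Set.ofList
          ((fes.filter (fun e => PySem.Str.strip e != "")).map (fun e => PySem.Str.lower (PySem.Str.strip e)))
        if focusTokens = [] then triples
        else
          let bs := triples.foldl (pvBucketStep focusTokens) ([], [], [], [], [])
          bs.2.2.2.2 ++ bs.2.2.2.1 ++ bs.2.2.1 ++ bs.2.1 ++ bs.1

-- ===== PRECONDITION & SPEC =====
def Spec_prioritise_triples_py (triples : List (List (String × String))) (focus_entities : Option (List String)) (out : List (List (String × String))) : Prop := out = prioritise_triples_py_alt triples focus_entities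
instance (triples : List (List (String × String))) (focus_entities : Option (List String)) (out : List (List (String × String))) : Decidable (Spec_prioritise_triples_py triples focus_entities out) := by unfold Spec_prioritise_triples_py; infer_instance

-- ===== CLAIM (what is proved, stated in full; the proofs are below) =====
def Claim_equal_prioritise_triples_py : Prop := ∀ (triples : List (List (String × String))) (focus_entities : Option (List String)), Dom_prioritise_triples_py triples focus_entities → Spec_prioritise_triples_py triples focus_entities (prioritise_triples_py triples focus_entities)

-- ===== LEMMAS AND PROOFS =====

-- A's _score is minus B's match score
theorem scoreA_eq_neg_matchScore (toks : List String) (t : List (String × String)) :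
    pvScoreA toks t = -(pvMatchScoreB toks t) := by
  simp only [pvScoreA, pvValueA, pvMatchScoreB, pvEntityMatch, List.foldl]
  split_ifs <;> omega

-- each entity contributes 0, 1 or 2
theorem entityMatch_range (toks : List String) (r : Option String) :
    0 ≤ pvEntityMatch toks r ∧ pvEntityMatch toks r ≤ 2 := by
  simp only [pvEntityMatch]
  split_ifs <;> omega

theorem matchScore_range (toks : List String) (t : List (String × String)) :
    0 ≤ pvMatchScoreB toks t ∧ pvMatchScoreB toks t ≤ 4 := by
  have h1 := entityMatch_range toks (PySem.Dict.get? (PySem.Dict.mk t) "entity1")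
  have h2 := entityMatch_range toks (PySem.Dict.get? (PySem.Dict.mk t) "entity2")
  simp only [pvMatchScoreB]
  omega

-- inserting past a prefix it does not go before
theorem insertBy_append_of_not_before {α : Type} (before : α → α → Bool) (x : α)
    (as bs : List α) (h : ∀ y ∈ as, before x y = false) :
    PySem.List.insertBy before x (as ++ bs) = as ++ PySem.List.insertBy before x bs := by
  induction as with
  | nil => simp
  | cons a as ih =>
    have ha : before x a = false := h a (by simp)
    simp only [List.cons_append, PySem.List.insertBy, ha]
    simp only [Bool.false_eq_true, if_false]
    rw [ih (fun y hy => h y (by simp [hy]))]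

-- inserting into a concatenation of strictly-increasing key groups lands at the end of x's group
theorem insertBy_flatMap_groups {α : Type} (key : α → Int) (x : α) :
    ∀ (vs : List Int) (G : Int → List α), vs.Pairwise (· < ·) →
    (∀ v ∈ vs, ∀ y ∈ G v, key y = v) → key x ∈ vs →
    PySem.List.insertBy (fun a b => decide (key a < key b)) x (vs.flatMap G)
      = vs.flatMap (fun v => if key x == v then G v ++ [x] else G v) := by
  intro vs
  induction vs with
  | nil => intro G _ _ hx; simp at hx
  | cons v vs ih =>
    intro G hp hG hx
    simp only [List.flatMap_cons]
    by_cases hxv : key x = v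
    · rw [insertBy_append_of_not_before _ _ _ _ (by
        intro y hy
        have hk := hG v (by simp) y hy
        simp [hk, hxv])]
      have hcons : PySem.List.insertBy (fun a b => decide (key a < key b)) x (vs.flatMap G)
          = x :: vs.flatMap G := by
        cases hfm : vs.flatMap G with
        | nil => simp [PySem.List.insertBy]
        | cons z zs =>
          have hz : z ∈ vs.flatMap G := by rw [hfm]; simp
          rw [List.mem_flatMap] at hz
          obtain ⟨v', hv', hzv'⟩ := hz
          have hkz : key z = v' := hG v' (by simp [hv']) z hzv'
          have hlt : v < v' := (List.pairwise_cons.mp hp).1 v' hv'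
          have hb : decide (key x < key z) = true := by
            simp only [decide_eq_true_eq, hkz, hxv]; omega
          simp [PySem.List.insertBy, hb]
      rw [hcons]
      have hrest : vs.flatMap (fun v' => if key x == v' then G v' ++ [x] else G v') = vs.flatMap G := by
        rw [List.flatMap_def, List.flatMap_def]
        congr 1
        apply List.map_congr_left
        intro v' hv'
        have hlt : v < v' := (List.pairwise_cons.mp hp).1 v' hv'
        have : (key x == v') = false := by simp only [beq_eq_false_iff_ne, ne_eq, hxv]; omega
        simp [this]
      rw [hrest]
      simp [hxv, List.append_assoc]
    · have hx' : key x ∈ vs := by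
        rcases List.mem_cons.mp hx with h | h
        · exact absurd h hxv
        · exact h
      have hlt : v < key x := (List.pairwise_cons.mp hp).1 _ hx'
      rw [insertBy_append_of_not_before _ _ _ _ (by
        intro y hy
        have hk := hG v (by simp) y hy
        simp only [decide_eq_false_iff_not, hk, not_lt]
        omega)]
      rw [ih G (List.pairwise_cons.mp hp).2 (fun v' hv' => hG v' (by simp [hv'])) hx']
      have : (key x == v) = false := by simp only [beq_eq_false_iff_ne, ne_eq]; exact hxv
      simp [this]

-- stable sort with keys drawn from a strictly increasing list = concatenation of filters
theorem sorted_eq_flatMap_filter {α : Type} (key : α → Int) (vs : List Int)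
    (hvs : vs.Pairwise (· < ·)) :
    ∀ (xs : List α), (∀ x ∈ xs, key x ∈ vs) →
    PySem.List.sorted xs key = vs.flatMap (fun v => xs.filter (fun x => key x == v)) := by
  intro xs
  induction xs using List.reverseRecOn with
  | nil => intro _; simp [PySem.List.sorted]
  | append_singleton xs x ih =>
    intro hmem
    rw [PySem.List.sorted_eq_foldl_insertBy, List.foldl_append]
    simp only [List.foldl_cons, List.foldl_nil]
    rw [← PySem.List.sorted_eq_foldl_insertBy, ih (fun y hy => hmem y (by simp [hy]))]
    rw [insertBy_flatMap_groups key x vs (fun v => xs.filter (fun y => key y == v)) hvs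
      (by intro v _ y hy; simpa using (List.mem_filter.mp hy).2) (hmem x (by simp))]
    rw [List.flatMap_def, List.flatMap_def]
    congr 1
    apply List.map_congr_left
    intro v _
    rw [List.filter_append]
    by_cases hxv : key x = v
    · simp [hxv]
    · have : (key x == v) = false := by simpa using hxv
      simp [this]

-- the bucket loop collects the five filters
theorem bucket_inv (toks : List String) :
    ∀ (l : List (List (String × String)))
      (acc : List (List (String × String)) × List (List (String × String)) × List (List (String × String)) × List (List (String × String)) × List (List (String × String))),
    l.foldl (pvBucketStep toks) acc =
      (acc.1 ++ l.filter (fun t => pvMatchScoreB toks t == 0),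
       acc.2.1 ++ l.filter (fun t => pvMatchScoreB toks t == 1),
       acc.2.2.1 ++ l.filter (fun t => pvMatchScoreB toks t == 2),
       acc.2.2.2.1 ++ l.filter (fun t => pvMatchScoreB toks t == 3),
       acc.2.2.2.2 ++ l.filter (fun t => pvMatchScoreB toks t == 4)) := by
  intro l
  induction l with
  | nil => intro acc; simp
  | cons t l ih =>
    intro acc
    rw [List.foldl_cons, ih]
    have hr := matchScore_range toks t
    have h5 : pvMatchScoreB toks t = 0 ∨ pvMatchScoreB toks t = 1 ∨ pvMatchScoreB toks t = 2 ∨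
        pvMatchScoreB toks t = 3 ∨ pvMatchScoreB toks t = 4 := by omega
    rcases h5 with h|h|h|h|h <;>
      simp [pvBucketStep, h, List.append_assoc]

-- the sorted call and the bucket pass produce the same list
theorem sorted_eq_buckets (toks : List String) (triples : List (List (String × String))) :
    PySem.List.sorted triples (pvScoreA toks) =
      (triples.foldl (pvBucketStep toks) ([], [], [], [], [])).2.2.2.2 ++
      (triples.foldl (pvBucketStep toks) ([], [], [], [], [])).2.2.2.1 ++
      (triples.foldl (pvBucketStep toks) ([], [], [], [], [])).2.2.1 ++
      (triples.foldl (pvBucketStep toks) ([], [], [], [], [])).2.1 ++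
      (triples.foldl (pvBucketStep toks) ([], [], [], [], [])).1 := by
  have hkey : pvScoreA toks = fun t => -(pvMatchScoreB toks t) :=
    funext (scoreA_eq_neg_matchScore toks)
  rw [hkey]
  rw [sorted_eq_flatMap_filter _ [-4, -3, -2, -1, 0] (by decide) _ (by
    intro x _
    have := matchScore_range toks x
    simp only [List.mem_cons]
    omega)]
  rw [bucket_inv]
  simp only [List.flatMap_cons, List.flatMap_nil, List.append_nil, List.nil_append]
  have hpred : ∀ a b : Int, (∀ y : Int, -y = a ↔ y = b) →
      (fun x => -(pvMatchScoreB toks x) == a) = (fun x => pvMatchScoreB toks x == b) := by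
    intro a b hab
    funext x
    apply Bool.eq_iff_iff.mpr
    simp only [beq_iff_eq]
    exact hab _
  rw [hpred (-4) 4 (by omega), hpred (-3) 3 (by omega), hpred (-2) 2 (by omega),
      hpred (-1) 1 (by omega), hpred 0 0 (by omega)]
  simp [List.append_assoc]

-- ===== VERDICT (by name: the statement is the Claim_ definition above) =====
theorem prioritise_triples_py_spec : Claim_equal_prioritise_triples_py := by
  intro triples fes _
  simp only [Spec_prioritise_triples_py, prioritise_triples_py, prioritise_triples_py_alt]
  by_cases h0 : triples = []
  · simp [h0]
  · cases fes with
    | none => simp [h0]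
    | some l =>
      by_cases h1 : l = []
      · simp [h0, h1]
      · simp only [h0, h1, if_false]
        by_cases h2 : PySem.Set.ofList
            ((l.filter (fun e => PySem.Str.strip e != "")).map (fun e => PySem.Str.lower (PySem.Str.strip e))) = []
        · simp [h2]
        · simp only [h2, if_false]
          rw [sorted_eq_buckets]
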